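-- pv_equiv track=rewrite | github.com/insult0o/torematrix_labs2 | src/torematrix/core/processing/parsers/table.py | _detect_column_positions
-- ===== SOURCE A (Python) =====
-- from typing import Dict, Any, List, Optional, Tuple, Union
--
-- def _detect_column_positions(lines: List[str]) -> List[int]:
--     """Detect column positions in aligned text."""
--     if not lines:
--         return [0]
--
--     # Find positions where all lines have whitespace
--     max_length = max(len(line) for line in lines)
--     column_breaks = []
--
--     for pos in range(max_length):
--         is_break = True
--         for line in lines:
--             if pos < len(line) and not line[pos].isspace():
--                 is_break = False
--                 break
--         if is_break:
--             column_breaks.append(pos)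
--
--     # Convert breaks to column start positions
--     positions = [0]
--     in_break = False
--
--     for pos in range(max_length):
--         if pos in column_breaks:
--             if not in_break:
--                 in_break = True
--         else:
--             if in_break:
--                 positions.append(pos)
--                 in_break = False
--
--     positions.append(max_length)
--     return positions
-- ===== SOURCE B (Python) =====
-- from typing import List
--
-- def _detect_column_positions(lines: List[str]) -> List[int]:
--     """Detect column positions in aligned text (line-major content scan)."""
--     if not lines:
--         return [0]
--
--     max_length = max(len(line) for line in lines)
--
--     # content[j] is True iff some line has a non-whitespace character at column j
--     content = [False] * max_length
--     for line in lines: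
--         mask = [not ch.isspace() for ch in line]
--         mask += [False] * (max_length - len(mask))
--         content = [a or b for a, b in zip(content, mask)]
--
--     # a column starts at 0 and at every break -> content rising edge
--     positions = [0]
--     for i in range(1, max_length):
--         if content[i] and not content[i - 1]:
--             positions.append(i)
--     positions.append(max_length)
--     return positions
-- ===== Notes on version B (the rewrite author's own statement) =====
-- stated objective: simpler
-- what changed: Replaces A's two column-major passes (an all-lines-whitespace scan per position building a break list, then a rising-edge scan doing a linear membership test 'pos in column_breaks' per position) with one line-major pass that or-merges each line's non-whitespace mask into a content array, then a direct rising-edge scan content[i] and not content[i-1].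
import Mathlib
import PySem

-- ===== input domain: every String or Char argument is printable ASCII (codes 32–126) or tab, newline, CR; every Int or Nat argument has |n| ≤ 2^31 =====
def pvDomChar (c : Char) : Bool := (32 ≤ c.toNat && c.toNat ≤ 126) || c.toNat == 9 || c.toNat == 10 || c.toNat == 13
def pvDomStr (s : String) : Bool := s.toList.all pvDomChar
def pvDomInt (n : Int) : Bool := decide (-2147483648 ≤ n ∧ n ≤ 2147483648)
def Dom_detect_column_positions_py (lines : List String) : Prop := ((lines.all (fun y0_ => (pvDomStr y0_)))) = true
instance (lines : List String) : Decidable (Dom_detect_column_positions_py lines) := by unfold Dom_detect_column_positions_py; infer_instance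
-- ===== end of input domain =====

-- B replaces A's two column-major passes (break list + membership-test scan) with one
-- line-major or-merge into a content array followed by a direct rising-edge scan (simpler).

-- ===== PORT A =====
-- pos < len(line) and not line[pos].isspace()   (the default ' ' is only read when the guard is false)
def pvNonWsA (line : String) (pos : Int) : Bool :=
  decide (pos < PySem.Str.len line) && ! PySem.Chars.isspace (PySem.List.pyGetD line.toList pos ' ')

-- the inner 'for line in lines: … break' loop computing is_break
def pvIsBreak (lines : List String) (pos : Int) : Bool :=
  ! lines.any (fun line => pvNonWsA line pos)

def detect_column_positions_py (lines : List String) : List Int :=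
  if lines = [] then [0]
  else
    let maxLen : Int := (PySem.List.max? (lines.map (fun l => PySem.Str.len l)) (fun x => x)).getD 0
    let column_breaks : List Int :=
      (PySem.List.pyRange 0 maxLen 1).foldl
        (fun acc pos => if pvIsBreak lines pos then acc ++ [pos] else acc) []
    let st :=
      (PySem.List.pyRange 0 maxLen 1).foldl
        (fun (st : List Int × Bool) pos =>
          if column_breaks.contains pos then (st.1, true)
          else if st.2 then (st.1 ++ [pos], false) else (st.1, false)) ([0], false)
    st.1 ++ [maxLen]

-- ===== PORT B =====
-- or-merge one line's non-whitespace mask (padded with False to max_length) into content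
def pvMaskMerge (maxLen : Int) (c : List Bool) (line : String) : List Bool :=
  (c.zip (line.toList.map (fun ch => ! PySem.Chars.isspace ch)
      ++ List.replicate (maxLen - ((line.toList.map (fun ch => ! PySem.Chars.isspace ch)).length : Int)).toNat false)).map
    (fun p => p.1 || p.2)

def detect_column_positions_py_alt (lines : List String) : List Int :=
  if lines = [] then [0]
  else
    let maxLen : Int := (PySem.List.max? (lines.map (fun l => PySem.Str.len l)) (fun x => x)).getD 0
    let content : List Bool := lines.foldl (pvMaskMerge maxLen) (List.replicate maxLen.toNat false)
    let positions :=
      (PySem.List.pyRange 1 maxLen 1).foldl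
        (fun acc i =>
          if PySem.List.pyGetD content i false && ! PySem.List.pyGetD content (i - 1) false
          then acc ++ [i] else acc) [0]
    positions ++ [maxLen]

-- ===== PRECONDITION & SPEC =====
def Spec_detect_column_positions_py (lines : List String) (out : List Int) : Prop := out = detect_column_positions_py_alt lines
instance (lines : List String) (out : List Int) : Decidable (Spec_detect_column_positions_py lines out) := by unfold Spec_detect_column_positions_py; infer_instance

-- ===== CLAIM (what is proved, stated in full; the proofs are below) =====
def Claim_equal_detect_column_positions_py : Prop := ∀ (lines : List String), Dom_detect_column_positions_py lines → Spec_detect_column_positions_py lines (detect_column_positions_py lines)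

-- ===== LEMMAS AND PROOFS =====

-- content[j]: some line has a non-whitespace character at column j
def pvCnt (lines : List String) (j : Nat) : Bool :=
  lines.any (fun line => pvNonWsA line (j : Int))

lemma pvNonWsA_natCast (line : String) (j : Nat) :
    pvNonWsA line (j : Int)
      = (decide (j < line.toList.length) && ! PySem.Chars.isspace (line.toList.getD j ' ')) := by
  simp only [pvNonWsA, PySem.Str.len_eq, PySem.List.pyGetD_natCast, Nat.cast_lt]

lemma pvMaskMerge_map_range (n : Nat) (f : Nat → Bool) (line : String)
    (h : line.toList.length ≤ n) :
    pvMaskMerge (n : Int) ((List.range n).map f) line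
      = (List.range n).map (fun j => f j || pvNonWsA line (j : Int)) := by
  unfold pvMaskMerge
  have hts : ((n : Int) - ((line.toList.map (fun ch => ! PySem.Chars.isspace ch)).length : Int)).toNat
      = n - line.toList.length := by simp only [List.length_map]; omega
  rw [hts]
  apply List.ext_getElem
  · simp; omega
  · intro i h1 h2
    have hi : i < n := by simpa using h2
    simp only [List.getElem_map, List.getElem_zip, List.getElem_range]
    by_cases hil : i < line.toList.length
    · rw [List.getElem_append_left (by simpa using hil)]
      simp only [List.getElem_map, pvNonWsA_natCast, hil, decide_true, Bool.true_and,
        List.getD_eq_getElem _ _ hil]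
    · rw [List.getElem_append_right (by simpa using hil)]
      simp only [List.getElem_replicate, pvNonWsA_natCast]
      have hil' : ¬ i < line.length := by simpa using hil
      simp [hil']

lemma pvContent_eq (n : Nat) :
    ∀ (ls : List String) (f : Nat → Bool), (∀ l ∈ ls, l.toList.length ≤ n) →
    ls.foldl (pvMaskMerge (n : Int)) ((List.range n).map f)
      = (List.range n).map (fun j => f j || pvCnt ls j) := by
  intro ls
  induction ls with
  | nil => intro f _; simp [pvCnt]
  | cons line rest ih =>
    intro f h
    rw [List.foldl_cons, pvMaskMerge_map_range n f line (h line (by simp)),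
      ih _ (fun l hl => h l (by simp [hl]))]
    simp only [pvCnt, List.any_cons, Bool.or_assoc]

-- A's break test at column j is the negation of content[j]
lemma pvIsBreak_eq (lines : List String) (j : Nat) :
    pvIsBreak lines (j : Int) = ! pvCnt lines j := by
  simp [pvIsBreak, pvCnt]

-- the two scans agree: A's (positions, in_break) state vs B's rising-edge fold
lemma pvScan_eq (lines : List String) (n : Nat) :
    ∀ m : Nat, m ≤ n →
    (PySem.List.pyRange 0 (m : Int) 1).foldl
        (fun (st : List Int × Bool) pos =>
          if ((PySem.List.pyRange 0 (n : Int) 1).filter (pvIsBreak lines)).contains pos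
          then (st.1, true)
          else if st.2 then (st.1 ++ [pos], false) else (st.1, false)) ([0], false)
    = ((PySem.List.pyRange 1 (m : Int) 1).foldl
        (fun acc i =>
          if PySem.List.pyGetD ((List.range n).map (pvCnt lines)) i false
               && ! PySem.List.pyGetD ((List.range n).map (pvCnt lines)) (i - 1) false
          then acc ++ [i] else acc) [0],
       decide (0 < m) && ! pvCnt lines (m - 1)) := by
  intro m
  induction m with
  | zero =>
    intro _
    rw [PySem.List.pyRange_one_eq_nil (a := 0) (b := ((0 : Nat) : Int)) (by simp),
      PySem.List.pyRange_one_eq_nil (a := 1) (b := ((0 : Nat) : Int)) (by simp)]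
    simp
  | succ m ih =>
    intro hm
    have hmn : m < n := by omega
    have hcast : ((m + 1 : Nat) : Int) = (m : Int) + 1 := by push_cast; ring
    rw [hcast, PySem.List.pyRange_one_succ_right (by positivity), List.foldl_append,
      ih (by omega)]
    have hmem : ((m : Int)) ∈ PySem.List.pyRange 0 (n : Int) 1 := by
      rw [PySem.List.mem_pyRange_one]; constructor <;> [positivity; exact_mod_cast hmn]
    have hcont : ((PySem.List.pyRange 0 (n : Int) 1).filter (pvIsBreak lines)).contains (m : Int)
        = ! pvCnt lines m := by
      rw [← pvIsBreak_eq]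
      cases hb : pvIsBreak lines (m : Int) <;>
        simp [List.mem_filter, hb, hmem]
    have hgm : PySem.List.pyGetD ((List.range n).map (pvCnt lines)) ((m : Nat) : Int) false
        = pvCnt lines m := by
      rw [PySem.List.pyGetD_natCast, PySem.List.getD_map_range _ _ _ _ hmn]
    rcases Nat.eq_zero_or_pos m with hm0 | hm0
    · subst hm0
      rw [PySem.List.pyRange_one_eq_nil (a := 1) (b := ((0 : Nat) : Int) + 1) (by simp)]
      simp only [List.foldl_cons, List.foldl_nil, hcont]
      cases hc : pvCnt lines 0 <;> simp
    · have h1m : (1 : Int) ≤ (m : Int) := by exact_mod_cast hm0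
      rw [PySem.List.pyRange_one_succ_right h1m, List.foldl_append]
      have hpred : ((m : Int)) - 1 = ((m - 1 : Nat) : Int) := by omega
      have hgp : PySem.List.pyGetD ((List.range n).map (pvCnt lines)) ((m : Int) - 1) false
          = pvCnt lines (m - 1) := by
        rw [hpred, PySem.List.pyGetD_natCast, PySem.List.getD_map_range _ _ _ _ (by omega)]
      simp only [List.foldl_cons, List.foldl_nil, hcont, hgm, hgp]
      have hd : decide (0 < m) = true := by simpa using hm0
      have hd1 : decide (0 < m + 1) = true := by simp
      rw [hd, hd1]
      have hsub : m + 1 - 1 = m := by omega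
      rw [hsub]
      cases hc : pvCnt lines m <;> cases hc1 : pvCnt lines (m - 1) <;> simp

-- ===== VERDICT (by name: the statement is the Claim_ definition above) =====
theorem detect_column_positions_py_spec : Claim_equal_detect_column_positions_py := by
  intro lines _
  unfold Spec_detect_column_positions_py detect_column_positions_py detect_column_positions_py_alt
  by_cases hnil : lines = []
  · simp [hnil]
  · simp only [hnil, if_false]
    -- name the shared max length and show it is a nonnegative upper bound of all line lengths
    obtain ⟨x, t, hxt⟩ := List.exists_cons_of_ne_nil hnil
    set maxLen : Int := (PySem.List.max? (lines.map (fun l => PySem.Str.len l)) (fun x => x)).getD 0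
      with hmaxdef
    have hsome : PySem.List.max? (lines.map (fun l => PySem.Str.len l)) (fun x => x)
        = some maxLen := by
      rw [hmaxdef, hxt]
      simp [PySem.List.max?_id_cons]
    have hub : ∀ l ∈ lines, l.toList.length ≤ maxLen.toNat := by
      intro l hl
      have := PySem.List.max?_isMax hsome (PySem.Str.len l)
        (by exact List.mem_map.mpr ⟨l, hl, rfl⟩)
      rw [PySem.Str.len_eq] at this
      omega
    have hnn : 0 ≤ maxLen := by
      have hx : PySem.Str.len x ∈ lines.map (fun l => PySem.Str.len l) := by
        rw [hxt]; simp
      have := PySem.List.max?_isMax hsome (PySem.Str.len x) hx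
      rw [PySem.Str.len_eq] at this
      omega
    set n : Nat := maxLen.toNat with hn
    have hcast : (n : Int) = maxLen := by omega
    -- rewrite B's content as the column-content table
    have hcontent : lines.foldl (pvMaskMerge ((n : Nat) : Int)) (List.replicate n false)
        = (List.range n).map (pvCnt lines) := by
      have hrep : List.replicate n false = (List.range n).map (fun _ => false) := by
        rw [show (fun (_ : Nat) => false) = Function.const Nat false from rfl, List.map_const]
        simp
      rw [hrep, pvContent_eq n lines (fun _ => false) (by rw [hn]; exact hub)]
      simp
    -- rewrite A's break list as a filter of the position range
    have hbreaks : (PySem.List.pyRange 0 maxLen 1).foldl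
        (fun acc pos => if pvIsBreak lines pos then acc ++ [pos] else acc) []
        = (PySem.List.pyRange 0 maxLen 1).filter (pvIsBreak lines) := by
      have := PySem.List.foldl_append_if (pvIsBreak lines) (fun x => x)
        (PySem.List.pyRange 0 maxLen 1) []
      simpa using this
    rw [← hcast] at hbreaks ⊢
    rw [hbreaks, hcontent, pvScan_eq lines n n (le_refl n)]
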